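-- pv_equiv track=rewrite | github.com/tsuru7/algorithm-study | AtCoder/ABC/201-300/ABC254/C.py | solve
-- ===== SOURCE A (Python) =====
-- def solve(n,k,a):
--     b = [ [] for _ in range(k) ]
--     for i in range(n):
--         j = i % k
--         b[j].append(a[i])
--     for j in range(k):
--         b[j].sort()
--     c = []
--     for i in range(n):
--         l, j = divmod(i, k)
--         c.append(b[j][l])
--     a.sort()
--     if a == c:
--         return 'Yes'
--     else:
--         return 'No'
-- ===== SOURCE B (Python) =====
-- def solve(n, k, a):
--     # The sorted order is reachable by independently sorting each index-residue class,
--     # which holds iff sorting preserves the multiset of values in every residue class.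
--     # So count values per residue class (a dict keyed by (position % k, value)) of the
--     # declared array a[:n] and of the fully sorted array, and compare the two dicts.
--     def counts(xs):
--         cnt = {}
--         for i, x in enumerate(xs):
--             key = (i % k, x)
--             cnt[key] = cnt.get(key, 0) + 1
--         return cnt
--     before = counts(a[:n])
--     a.sort()
--     return 'Yes' if counts(a) == before else 'No'
-- ===== Notes on version B (the rewrite author's own statement) =====
-- stated objective: alternative
-- what changed: Replaces per-bucket sorting plus the round-robin reconstruction pass and list comparison by multiset counting: one dict keyed by (position % k, value) is built from a[:n] and from the fully sorted array, and the answer is a dict equality, so no bucket lists are ever sorted or re-interleaved; Pre_ excludes the inputs on which A raises (n > len(a), or n > 0 with k <= 0) and the corner n <= 0, k == 0, a nonempty, where A's 'No' never touches the data while B's counting raises ZeroDivisionError.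
-- outside the precondition, e.g. on solve(0, 0, [1]): A returns 'No', B raises ZeroDivisionError
import Mathlib
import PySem

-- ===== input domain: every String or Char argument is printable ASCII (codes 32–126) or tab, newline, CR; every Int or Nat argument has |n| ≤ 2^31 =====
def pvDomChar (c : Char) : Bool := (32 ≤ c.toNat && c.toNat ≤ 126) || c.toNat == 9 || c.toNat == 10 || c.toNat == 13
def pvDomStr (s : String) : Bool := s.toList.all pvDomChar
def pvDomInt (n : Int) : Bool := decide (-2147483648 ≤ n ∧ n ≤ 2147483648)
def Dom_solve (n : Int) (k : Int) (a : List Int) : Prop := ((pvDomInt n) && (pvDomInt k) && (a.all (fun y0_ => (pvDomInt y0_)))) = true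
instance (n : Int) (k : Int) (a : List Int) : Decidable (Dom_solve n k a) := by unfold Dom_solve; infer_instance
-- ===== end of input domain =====

-- B replaces A's per-bucket sorting and round-robin reconstruction by one counting dict keyed by
-- (position % k, value) built from a[:n] and from the sorted array; equivalence is about the
-- RETURN value (both A and B sort the list argument in place in Python).

-- ===== PORT A =====
def solve (n : Int) (k : Int) (a : List Int) : String :=
  -- b = [ [] for _ in range(k) ]
  let b := (PySem.List.pyRange 0 k 1).map (fun _ => ([] : List Int))
  -- for i in range(n): j = i % k; b[j].append(a[i])
  let b := (PySem.List.pyRange 0 n 1).foldl (fun b i =>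
      let j := PySem.Int.mod i k
      b.set j.toNat (b.getD j.toNat [] ++ [(PySem.List.pyGet? a i).getD 0])) b
  -- for j in range(k): b[j].sort()
  let b := (PySem.List.pyRange 0 k 1).foldl (fun b j =>
      b.set j.toNat (PySem.List.sorted (b.getD j.toNat []) (fun x => x) false)) b
  -- c = []; for i in range(n): l, j = divmod(i, k); c.append(b[j][l])
  let c := (PySem.List.pyRange 0 n 1).foldl (fun c i =>
      let l := PySem.Int.floordiv i k
      let j := PySem.Int.mod i k
      c ++ [(PySem.List.pyGet? (b.getD j.toNat []) l).getD 0]) []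
  -- a.sort(); return 'Yes' if a == c else 'No'
  if PySem.List.sorted a (fun x => x) false = c then "Yes" else "No"

-- ===== PORT B =====
-- cnt = {}; for i, x in enumerate(xs): key = (i % k, x); cnt[key] = cnt.get(key, 0) + 1
def countsB (k : Int) (xs : List Int) : PySem.Dict (Int × Int) Int :=
  (PySem.List.enumerate xs 0).foldl (fun d p =>
      let key := (PySem.Int.mod p.1 k, p.2)
      d.insert key (d.getD key 0 + 1)) PySem.Dict.empty

-- Python dict ==: order-insensitive comparison of the key/value pairs
def pyDictEq (d d' : PySem.Dict (Int × Int) Int) : Bool :=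
  d.size == d'.size && d.items.all (fun kv => d'.get? kv.1 == some kv.2)

def solve_alt (n : Int) (k : Int) (a : List Int) : String :=
  let before := countsB k (PySem.List.slice a none (some n))  -- counts(a[:n])
  let aSorted := PySem.List.sorted a (fun x => x) false       -- a.sort()
  if pyDictEq (countsB k aSorted) before then "Yes" else "No"

-- ===== PRECONDITION & SPEC =====
-- Pre_ excludes exactly the inputs on which A raises (n > len(a): IndexError; n > 0 with k ≤ 0:
-- ZeroDivisionError/IndexError) and the corner n ≤ 0, k = 0, a nonempty, where A returns 'No'
-- without ever touching the data while B's own counting raises ZeroDivisionError.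
def Pre_solve (n : Int) (k : Int) (a : List Int) : Prop :=
  n ≤ (a.length : Int) ∧ (0 < n → 1 ≤ k) ∧ (n ≤ 0 → a ≠ [] → k ≠ 0)
instance (n : Int) (k : Int) (a : List Int) : Decidable (Pre_solve n k a) := by unfold Pre_solve; infer_instance
def pvWitness_solve : Int × Int × List Int := (4, 2, [3, 2, 1, 4])

def Spec_solve (n : Int) (k : Int) (a : List Int) (out : String) : Prop := out = solve_alt n k a
instance (n : Int) (k : Int) (a : List Int) (out : String) : Decidable (Spec_solve n k a out) := by unfold Spec_solve; infer_instance

-- ===== CLAIM (what is proved, stated in full; the proofs are below) =====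
def Claim_equal_solve : Prop := ∀ (n : Int) (k : Int) (a : List Int), Dom_solve n k a → Pre_solve n k a → Spec_solve n k a (solve n k a)

-- ===== LEMMAS AND PROOFS =====

def bIdx (n k j : Nat) : List Nat := (List.range n).filter (fun i => i % k == j)
def cntR (n k j : Nat) : Nat := (bIdx n k j).length

theorem mem_bIdx (n k j i : Nat) : i ∈ bIdx n k j ↔ i < n ∧ i % k = j := by
  simp [bIdx]

theorem bIdx_succ (n k j : Nat) :
    bIdx (n+1) k j = bIdx n k j ++ (if n % k = j then [n] else []) := by
  simp [bIdx, List.range_succ, List.filter_append]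
  split_ifs with h <;> simp [h]

theorem cntR_succ (n k j : Nat) :
    cntR (n+1) k j = cntR n k j + (if n % k = j then 1 else 0) := by
  simp [cntR, bIdx_succ]; split_ifs <;> simp

theorem bIdx_eq_map (n k j : Nat) (hk : 0 < k) (hj : j < k) :
    bIdx n k j = (List.range (cntR n k j)).map (fun m => j + m * k) := by
  induction n with
  | zero => simp [bIdx, cntR]
  | succ n ih =>
    rw [bIdx_succ, cntR_succ, ih]
    by_cases h : n % k = j
    · rw [if_pos h, if_pos h]
      set c := cntR n k j with hc
      have hdm : k * (n / k) + n % k = n := Nat.div_add_mod n k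
      have htk : n = j + (n / k) * k := by rw [Nat.mul_comm] at hdm; omega
      have hn : n = j + c * k := by
        rcases Nat.lt_trichotomy (n / k) c with hlt | heq | hgt
        · exfalso
          have : j + (n / k) * k ∈ bIdx n k j := by
            rw [ih]; exact List.mem_map.2 ⟨n / k, List.mem_range.2 hlt, rfl⟩
          rw [mem_bIdx] at this; omega
        · rw [heq] at htk; omega
        · exfalso
          have hmod : (j + c * k) % k = j := by
            rw [Nat.add_mul_mod_self_right]; exact Nat.mod_eq_of_lt hj
          have hmem : j + c * k ∈ bIdx n k j := by
            rw [mem_bIdx]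
            refine ⟨?_, hmod⟩
            have : c * k < (n / k) * k := Nat.mul_lt_mul_of_lt_of_le hgt (le_refl k) hk
            omega
          rw [ih] at hmem
          obtain ⟨m, hm, hmeq⟩ := List.mem_map.1 hmem
          have hmlt := List.mem_range.1 hm
          have : m * k < c * k := Nat.mul_lt_mul_of_lt_of_le hmlt (le_refl k) hk
          omega
      rw [List.range_succ, List.map_append]
      simp [hn]
    · rw [if_neg h, if_neg h]; simp

theorem bIdx_lt (n k j m : Nat) (hk : 0 < k) (hj : j < k) (hm : m < cntR n k j) :
    j + m * k < n := by
  have : j + m * k ∈ bIdx n k j := by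
    rw [bIdx_eq_map n k j hk hj]; exact List.mem_map.2 ⟨m, List.mem_range.2 hm, rfl⟩
  exact ((mem_bIdx n k j _).1 this).1

theorem idx_lt_cntR (n k i : Nat) (hk : 0 < k) (hi : i < n) : i / k < cntR n k (i % k) := by
  have hj : i % k < k := Nat.mod_lt _ hk
  have hmem : i ∈ bIdx n k (i % k) := (mem_bIdx n k _ i).2 ⟨hi, rfl⟩
  rw [bIdx_eq_map n k _ hk hj] at hmem
  obtain ⟨m, hm, hmeq⟩ := List.mem_map.1 hmem
  have hmr := List.mem_range.1 hm
  have hdm : k * (i / k) + i % k = i := Nat.div_add_mod i k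
  have : m = i / k := by
    rcases Nat.lt_trichotomy m (i / k) with hlt | heq | hgt
    · have : m * k < (i / k) * k := Nat.mul_lt_mul_of_lt_of_le hlt (le_refl k) hk
      rw [Nat.mul_comm] at hdm; omega
    · exact heq
    · have : (i / k) * k < m * k := Nat.mul_lt_mul_of_lt_of_le hgt (le_refl k) hk
      rw [Nat.mul_comm] at hdm; omega
  omega

def buck (k j : Nat) (xs : List Int) : List Int := (bIdx xs.length k j).map (fun i => xs.getD i 0)
def pairsL (k : Nat) (xs : List Int) : List (Int × Int) :=
  (List.range xs.length).map (fun i => (((i % k : Nat) : Int), xs.getD i 0))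
def pairsE (k : Int) (xs : List Int) : List (Int × Int) :=
  (PySem.List.enumerate xs 0).map (fun p => (PySem.Int.mod p.1 k, p.2))

theorem length_buck (k j : Nat) (xs : List Int) : (buck k j xs).length = cntR xs.length k j := by
  simp [buck, cntR]

theorem getD_buck (k j m : Nat) (xs : List Int) (hk : 0 < k) (hj : j < k)
    (hm : m < cntR xs.length k j) :
    (buck k j xs).getD m 0 = xs.getD (j + m * k) 0 := by
  unfold buck
  rw [bIdx_eq_map _ k j hk hj, List.map_map]
  have hlen : m < ((List.range (cntR xs.length k j)).map ((fun i => xs.getD i 0) ∘ fun m => j + m * k)).length := by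
    simp [hm]
  rw [List.getD_eq_getElem _ _ hlen]
  simp

theorem pairwise_buck_sorted (k j : Nat) (xs : List Int) (hk : 0 < k) (hj : j < k) :
    (buck k j (PySem.List.sorted xs (fun x => x) false)).Pairwise (· ≤ ·) := by
  rw [List.pairwise_iff_getElem]
  intro p q hp hq hpq
  set s := PySem.List.sorted xs (fun x => x) false with hs
  have hlen : (buck k j s).length = cntR s.length k j := length_buck k j s
  have hps : p < cntR s.length k j := by omega
  have hqs : q < cntR s.length k j := by omega
  have h1 : (buck k j s)[p] = s.getD (j + p * k) 0 := by
    rw [← List.getD_eq_getElem _ 0, getD_buck k j p s hk hj hps]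
  have h2 : (buck k j s)[q] = s.getD (j + q * k) 0 := by
    rw [← List.getD_eq_getElem _ 0, getD_buck k j q s hk hj hqs]
  have hql : j + q * k < s.length := bIdx_lt _ k j q hk hj hqs
  have hpl : j + p * k < s.length := bIdx_lt _ k j p hk hj hps
  rw [h1, h2, List.getD_eq_getElem _ _ hpl, List.getD_eq_getElem _ _ hql]
  exact PySem.List.sorted_id_getElem_mono xs (by nlinarith) (by rw [PySem.List.length_sorted] at hql ⊢; exact hql)

theorem count_buck (k j : Nat) (v : Int) (xs : List Int) :
    (buck k j xs).count v
      = (List.range xs.length).countP (fun i => i % k == j && xs.getD i 0 == v) := by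
  unfold buck bIdx
  rw [List.count_eq_countP, List.countP_map, List.countP_filter]
  apply List.countP_congr
  intro i _
  simp only [Function.comp]
  constructor
  · rintro h; rw [Bool.and_comm]; exact h
  · rintro h; rw [Bool.and_comm]; exact h

theorem count_pairsL (k j : Nat) (v : Int) (xs : List Int) :
    (pairsL k xs).count (((j : Nat) : Int), v) = (buck k j xs).count v := by
  rw [count_buck]
  unfold pairsL
  rw [List.count_eq_countP, List.countP_map]
  apply List.countP_congr
  intro i _
  simp only [Function.comp, beq_iff_eq, Bool.and_eq_true, Prod.mk.injEq, Nat.cast_inj]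

theorem mem_pairsL_fst (k : Nat) (xs : List Int) (p : Int × Int) (hp : p ∈ pairsL k xs) (hk : 0 < k) :
    ∃ j : Nat, j < k ∧ p.1 = ((j : Nat) : Int) := by
  unfold pairsL at hp
  obtain ⟨i, _, hpe⟩ := List.mem_map.1 hp
  exact ⟨i % k, Nat.mod_lt _ hk, by rw [← hpe]⟩

theorem get?_counter_of_mem {κ : Type} [BEq κ] [LawfulBEq κ] (w : List κ) (p : κ) (hp : p ∈ w) :
    (PySem.Dict.counter w).get? p = some ((w.count p : Int)) := by
  have hcont : (PySem.Dict.counter w).contains p = true := by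
    rw [PySem.Dict.contains_counter]; exact List.contains_iff_mem.2 hp
  have hsome : ((PySem.Dict.counter w).get? p).isSome := by
    simp only [PySem.Dict.get?, PySem.Dict.contains] at *
    simp only [Option.isSome_map]
    rw [List.find?_isSome]
    simpa [List.any_eq_true] using hcont
  obtain ⟨x, hx⟩ := Option.isSome_iff_exists.1 hsome
  have := PySem.Dict.getD_counter w p
  rw [PySem.Dict.getD, hx] at this
  simp at this
  rw [hx, this]

theorem get?_counter_of_not_mem {κ : Type} [BEq κ] [LawfulBEq κ] (w : List κ) (p : κ) (hp : p ∉ w) :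
    (PySem.Dict.counter w).get? p = none := by
  by_contra h
  obtain ⟨x, hx⟩ := Option.ne_none_iff_exists'.1 h
  have hcont : (PySem.Dict.counter w).contains p = true := by
    simp only [PySem.Dict.get?] at hx
    simp only [PySem.Dict.contains, List.any_eq_true]
    obtain ⟨q, hq⟩ := Option.map_eq_some_iff.1 hx
    exact ⟨q, List.mem_of_find?_eq_some hq.1, by have := List.find?_some hq.1; exact this⟩
  rw [PySem.Dict.contains_counter] at hcont
  exact hp (List.contains_iff_mem.1 hcont)

theorem dictEq_counter_iff (u w : List (Int × Int)) :
    pyDictEq (PySem.Dict.counter u) (PySem.Dict.counter w) = true ↔ ∀ p, u.count p = w.count p := by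
  unfold pyDictEq
  rw [Bool.and_eq_true, beq_iff_eq]
  have hsize : ∀ (v : List (Int × Int)), (PySem.Dict.counter v).size = (PySem.Set.ofList v).length := by
    intro v
    simp [PySem.Dict.size, PySem.Dict.items_counter v]
  have hall : ((PySem.Dict.counter u).items.all (fun kv => (PySem.Dict.counter w).get? kv.1 == some kv.2) = true)
      ↔ ∀ p ∈ PySem.Set.ofList u, (PySem.Dict.counter w).get? p = some ((u.count p : Int)) := by
    rw [PySem.Dict.items_counter u, List.all_map, List.all_eq_true]
    constructor
    · intro h p hp; have := h p hp; simpa using this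
    · intro h p hp; simpa using h p hp
  rw [hsize, hsize, hall]
  constructor
  · rintro ⟨hlen, h⟩ p
    by_cases hpu : p ∈ u
    · have := h p ((PySem.Set.mem_ofList u p).2 hpu)
      by_cases hpw : p ∈ w
      · rw [get?_counter_of_mem w p hpw] at this
        exact_mod_cast (Option.some.injEq _ _ ▸ this : ((w.count p : Int)) = (u.count p : Int)).symm
      · rw [get?_counter_of_not_mem w p hpw] at this; exact absurd this (by simp)
    · -- p ∉ u; show p ∉ w via set equality
      have hsub : PySem.Set.ofList u ⊆ PySem.Set.ofList w := by
        intro q hq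
        have hqu : q ∈ u := (PySem.Set.mem_ofList u q).1 hq
        have := h q hq
        by_cases hqw : q ∈ w
        · exact (PySem.Set.mem_ofList w q).2 hqw
        · rw [get?_counter_of_not_mem w q hqw] at this; exact absurd this (by simp)
      have hperm : (PySem.Set.ofList u).Perm (PySem.Set.ofList w) :=
        ((PySem.Set.nodup_ofList u).subperm hsub).perm_of_length_le (le_of_eq hlen.symm)
      have hpw : p ∉ w := by
        intro hw
        exact hpu ((PySem.Set.mem_ofList u p).1 (hperm.mem_iff.2 ((PySem.Set.mem_ofList w p).2 hw)))
      rw [List.count_eq_zero.2 hpu, List.count_eq_zero.2 hpw]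
  · intro h
    have hmem : ∀ p, p ∈ u ↔ p ∈ w := by
      intro p
      constructor
      · intro hp; have := h p; rw [← List.count_pos_iff] at hp ⊢; omega
      · intro hp; have := h p; rw [← List.count_pos_iff] at hp ⊢; omega
    have hsub1 : PySem.Set.ofList u ⊆ PySem.Set.ofList w := fun q hq =>
      (PySem.Set.mem_ofList w q).2 ((hmem q).1 ((PySem.Set.mem_ofList u q).1 hq))
    have hsub2 : PySem.Set.ofList w ⊆ PySem.Set.ofList u := fun q hq =>
      (PySem.Set.mem_ofList u q).2 ((hmem q).2 ((PySem.Set.mem_ofList w q).1 hq))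
    have hsp1 := (PySem.Set.nodup_ofList u).subperm hsub1
    have hsp2 := (PySem.Set.nodup_ofList w).subperm hsub2
    constructor
    · exact Nat.le_antisymm hsp1.length_le hsp2.length_le
    · intro p hp
      have hpw : p ∈ w := (hmem p).1 ((PySem.Set.mem_ofList u p).1 hp)
      rw [get?_counter_of_mem w p hpw, h p]

def cList (k : Nat) (a : List Int) : List Int :=
  (List.range a.length).map (fun i =>
    (PySem.List.sorted (buck k (i % k) a) (fun x => x) false).getD (i / k) 0)

theorem sorted_eq_cList_iff (k : Nat) (a : List Int) (hk : 0 < k) :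
    (PySem.List.sorted a (fun x => x) false = cList k a)
      ↔ ∀ j < k, (buck k j (PySem.List.sorted a (fun x => x) false)).Perm (buck k j a) := by
  set s := PySem.List.sorted a (fun x => x) false with hs
  have hsl : s.length = a.length := PySem.List.length_sorted a _ _
  constructor
  · -- s = c → buckets of s are perms of buckets of a
    intro hc j hj
    have hbc : buck k j (cList k a) = PySem.List.sorted (buck k j a) (fun x => x) false := by
      have hclen : (cList k a).length = a.length := by simp [cList]
      apply List.ext_getElem
      · rw [length_buck, hclen, PySem.List.length_sorted, length_buck]
      · intro m hm1 hm2
        have hmc : m < cntR a.length k j := by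
          rw [length_buck, hclen] at hm1; exact hm1
        have hidx : j + m * k < a.length := bIdx_lt _ k j m hk hj hmc
        have e1 : (buck k j (cList k a))[m] = (cList k a).getD (j + m * k) 0 := by
          rw [← List.getD_eq_getElem _ 0, getD_buck k j m _ hk hj (by rw [hclen]; exact hmc)]
        have e2 : (cList k a).getD (j + m * k) 0
            = (PySem.List.sorted (buck k ((j + m * k) % k) a) (fun x => x) false).getD ((j + m * k) / k) 0 := by
          unfold cList
          rw [List.getD_eq_getElem _ _ (by simpa using hidx)]
          simp
        have hmod : (j + m * k) % k = j := by
          rw [Nat.add_mul_mod_self_right]; exact Nat.mod_eq_of_lt hj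
        have hdiv : (j + m * k) / k = m := by
          rw [Nat.add_mul_div_right _ _ hk, Nat.div_eq_of_lt hj]; omega
        rw [e1, e2, hmod, hdiv, List.getD_eq_getElem]
    rw [hc, hbc]
    exact PySem.List.sorted_perm _ _ _
  · -- buckets perm → s = c
    intro hb
    apply List.ext_getElem
    · simp [cList, hsl]
    · intro i hi1 hi2
      have hia : i < a.length := by omega
      have hj : i % k < k := Nat.mod_lt _ hk
      have hsort : PySem.List.sorted (buck k (i % k) a) (fun x => x) false = buck k (i % k) s :=
        PySem.List.sorted_id_eq_of_perm_of_pairwise _ _ (hb _ hj) (pairwise_buck_sorted k _ a hk hj)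
      have hmC : i / k < cntR s.length k (i % k) := by
        rw [hsl]; exact idx_lt_cntR a.length k i hk hia
      have e1 : (cList k a)[i] = (PySem.List.sorted (buck k (i % k) a) (fun x => x) false).getD (i / k) 0 := by
        simp [cList]
      have hdm : (i % k) + (i / k) * k = i := by
        have h1 := Nat.div_add_mod i k
        have h2 : k * (i / k) = (i / k) * k := Nat.mul_comm _ _
        omega
      rw [e1, hsort, getD_buck k _ _ s hk hj hmC, hdm, List.getD_eq_getElem _ _ hi1]

theorem counts_eq_iff (k : Nat) (a : List Int) (hk : 0 < k) :
    (∀ p, (pairsL k (PySem.List.sorted a (fun x => x) false)).count p = (pairsL k a).count p)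
      ↔ ∀ j < k, (buck k j (PySem.List.sorted a (fun x => x) false)).Perm (buck k j a) := by
  set s := PySem.List.sorted a (fun x => x) false with hs
  constructor
  · intro h j hj
    rw [List.perm_iff_count]
    intro v
    rw [← count_pairsL k j v s, ← count_pairsL k j v a]
    exact h _
  · intro h p
    by_cases hex : ∃ j : Nat, j < k ∧ p.1 = ((j : Nat) : Int)
    · obtain ⟨j, hj, hp1⟩ := hex
      have hp : p = (((j : Nat) : Int), p.2) := by rw [← hp1]
      rw [hp, count_pairsL k j p.2 s, count_pairsL k j p.2 a]
      exact List.perm_iff_count.1 (h j hj) p.2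
    · rw [List.count_eq_zero.2 (fun hmem => hex (mem_pairsL_fst k s p hmem hk)),
          List.count_eq_zero.2 (fun hmem => hex (mem_pairsL_fst k a p hmem hk))]

theorem set_map_range {β : Type} (k j : Nat) (f : Nat → β) (v : β) (hj : j < k) :
    ((List.range k).map f).set j v = (List.range k).map (fun j' => if j' = j then v else f j') := by
  apply List.ext_getElem
  · simp
  · intro m hm1 hm2
    have hmk : m < k := by simpa using hm2
    by_cases h : m = j
    · subst h
      rw [List.getElem_set_self (by simpa using hm1)]
      simp
    · rw [List.getElem_set_ne (by omega)]
      simp [h]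

theorem buck_take_succ (k j t : Nat) (xs : List Int) (ht : t < xs.length) :
    buck k j (xs.take (t+1))
      = buck k j (xs.take t) ++ (if t % k = j then [xs.getD t 0] else []) := by
  unfold buck
  have hl1 : (xs.take (t+1)).length = t+1 := by simp; omega
  have hl0 : (xs.take t).length = t := by simp; omega
  rw [hl1, hl0, bIdx_succ, List.map_append]
  congr 1
  · apply List.map_congr_left
    intro i hi
    have hit : i < t := ((mem_bIdx t k j i).1 hi).1
    rw [List.getD_eq_getElem?_getD, List.getD_eq_getElem?_getD, List.getElem?_take,
        List.getElem?_take]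
    simp [hit, Nat.lt_succ_of_lt hit]
  · split_ifs with h
    · simp [List.getD_eq_getElem?_getD, List.getElem?_take, ht]
    · simp

theorem phase1 (k : Nat) (xs : List Int) (hk : 0 < k) (t : Nat) (ht : t ≤ xs.length) :
    (List.range t).foldl (fun b i => b.set (i % k) (b.getD (i % k) [] ++ [xs.getD i 0]))
        ((List.range k).map (fun _ => ([] : List Int)))
      = (List.range k).map (fun j => buck k j (xs.take t)) := by
  induction t with
  | zero =>
    simp [buck, bIdx]
  | succ t ih =>
    rw [List.range_succ, List.foldl_append, ih (by omega)]
    simp only [List.foldl_cons, List.foldl_nil]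
    have hj : t % k < k := Nat.mod_lt _ hk
    rw [PySem.List.getD_map_range _ _ _ _ hj, set_map_range _ _ _ _ hj]
    apply List.map_congr_left
    intro j hjk
    rw [buck_take_succ k j t xs (by omega)]
    by_cases h : j = t % k
    · rw [if_pos h, if_pos h.symm, h]
    · rw [if_neg h, if_neg (fun hh => h hh.symm)]
      simp

theorem phase2 (k : Nat) (g : Nat → List Int) :
    (List.range k).foldl (fun b j => b.set j (PySem.List.sorted (b.getD j []) (fun x => x) false))
        ((List.range k).map g)
      = (List.range k).map (fun j => PySem.List.sorted (g j) (fun x => x) false) := by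
  suffices h : ∀ t ≤ k, (List.range t).foldl (fun b j => b.set j (PySem.List.sorted (b.getD j []) (fun x => x) false))
        ((List.range k).map g)
      = (List.range k).map (fun j => if j < t then PySem.List.sorted (g j) (fun x => x) false else g j) by
    have := h k (le_refl k)
    rw [this]
    apply List.map_congr_left
    intro j hj
    rw [if_pos (by simpa using hj)]
  intro t
  induction t with
  | zero => simp
  | succ t ih =>
    intro ht
    rw [List.range_succ, List.foldl_append, ih (by omega)]
    simp only [List.foldl_cons, List.foldl_nil]
    have htk : t < k := by omega
    rw [PySem.List.getD_map_range _ _ _ _ htk, set_map_range _ _ _ _ htk]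
    apply List.map_congr_left
    intro j hjk
    by_cases h : j = t
    · subst h
      rw [if_pos rfl, if_neg (by omega), if_pos (by omega)]
    · rw [if_neg h]
      by_cases h2 : j < t
      · rw [if_pos h2, if_pos (by omega)]
      · rw [if_neg h2, if_neg (by omega)]

theorem pyRange_nonpos (n : Int) (hn : n ≤ 0) : PySem.List.pyRange 0 n 1 = [] := by
  rw [PySem.List.pyRange_of_pos 0 n (by norm_num)]
  rw [if_neg (by omega)]
  simp

theorem solveA_eq (k' n' : Nat) (a : List Int) (hk : 0 < k') (hn : n' ≤ a.length) :
    solve (n' : Int) (k' : Int) a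
      = (if PySem.List.sorted a (fun x => x) false = cList k' (a.take n') then "Yes" else "No") := by
  unfold solve
  rw [PySem.List.pyRange_zero_natCast, PySem.List.pyRange_zero_natCast]
  simp only [List.foldl_map, List.map_map, Function.comp_def,
    PySem.Int.mod_natCast, PySem.Int.floordiv_natCast, Int.toNat_natCast,
    PySem.List.pyGet?_natCast, ← List.getD_eq_getElem?_getD]
  rw [phase1 k' a hk n' hn, phase2,
    PySem.List.foldl_append_singleton_eq_map]
  have hmap : ∀ i : Nat,
      ((((List.range k').map (fun j => PySem.List.sorted (buck k' j (a.take n')) (fun x => x) false)).getD (i % k') []).getD (i / k') 0)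
        = (PySem.List.sorted (buck k' (i % k') (a.take n')) (fun x => x) false).getD (i / k') 0 := by
    intro i
    rw [PySem.List.getD_map_range _ _ _ _ (Nat.mod_lt _ hk)]
  simp only [hmap, List.nil_append]
  have hcl : cList k' (a.take n')
      = (List.range n').map (fun i =>
          (PySem.List.sorted (buck k' (i % k') (a.take n')) (fun x => x) false).getD (i / k') 0) := by
    unfold cList
    rw [List.length_take, Nat.min_eq_left hn]
  rw [hcl]

theorem solveA_nonpos (n k : Int) (a : List Int) (hn : n ≤ 0) :
    solve n k a = (if a = [] then "Yes" else "No") := by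
  unfold solve
  rw [pyRange_nonpos n hn]
  simp only [List.foldl_nil]
  by_cases h : a = []
  · rw [if_pos ((PySem.List.sorted_eq_nil_iff a _ false).2 h), if_pos h]
  · rw [if_neg (fun hh => h ((PySem.List.sorted_eq_nil_iff a _ false).1 hh)), if_neg h]

theorem countsB_eq (k : Int) (xs : List Int) :
    countsB k xs = PySem.Dict.counter (pairsE k xs) := by
  unfold countsB pairsE
  rw [← PySem.Dict.foldl_insert_getD_add_one_eq_counter, List.foldl_map]

theorem length_pairsE (k : Int) (xs : List Int) : (pairsE k xs).length = xs.length := by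
  unfold pairsE
  rw [List.length_map, PySem.List.length_enumerate]

theorem pairsE_natCast (k' : Nat) (xs : List Int) :
    pairsE ((k' : Nat) : Int) xs = pairsL k' xs := by
  unfold pairsE pairsL
  rw [PySem.List.enumerate_eq_map_pyRange xs 0]
  simp only [PySem.List.len, PySem.List.pyRange_zero_natCast, List.map_map, Function.comp_def]
  apply List.map_congr_left
  intro i _
  rw [PySem.Int.mod_natCast, PySem.List.pyGetD_natCast]

-- Python dicts that compare equal are counters of lists of the same length
theorem dictEq_counter_length (u w : List (Int × Int))
    (h : pyDictEq (PySem.Dict.counter u) (PySem.Dict.counter w) = true) :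
    u.length = w.length := by
  exact ((List.perm_iff_count).2 ((dictEq_counter_iff u w).1 h)).length_eq

theorem solveB_no (n k : Int) (a : List Int)
    (h : (PySem.List.slice a none (some n)).length ≠ a.length) :
    solve_alt n k a = "No" := by
  unfold solve_alt
  dsimp only
  rw [countsB_eq, countsB_eq]
  rw [if_neg]
  intro hEq
  have := dictEq_counter_length _ _ hEq
  rw [length_pairsE, length_pairsE, PySem.List.length_sorted] at this
  exact h this.symm

theorem solveB_nil (n k : Int) : solve_alt n k [] = "Yes" := by
  unfold solve_alt
  dsimp only
  rw [(PySem.List.sorted_eq_nil_iff ([] : List Int) (fun x => x) false).2 rfl]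
  have hsl : PySem.List.slice ([] : List Int) none (some n) = [] := by
    by_cases h0 : 0 ≤ n
    · rw [PySem.List.slice_to _ h0]; simp
    · have : n = -(((-n).toNat : Nat) : Int) := by omega
      rw [this, PySem.List.slice_to_neg_natCast _ _ (by omega)]; simp
  rw [hsl]
  have hde : pyDictEq (countsB k []) (countsB k []) = true := by
    rw [countsB_eq]; exact (dictEq_counter_iff _ _).2 (fun _ => rfl)
  rw [if_pos hde]

theorem slice_to_length_lt (n : Int) (a : List Int) (ha : a ≠ []) (hn : n < (a.length : Int)) :
    (PySem.List.slice a none (some n)).length < a.length := by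
  have hal : 0 < a.length := List.length_pos_iff.2 ha
  by_cases h0 : 0 ≤ n
  · rw [PySem.List.slice_to _ h0, List.length_take]
    omega
  · have : n = -(((-n).toNat : Nat) : Int) := by omega
    rw [this, PySem.List.slice_to_neg_natCast _ _ (by omega), List.length_take]
    omega

-- ===== VERDICT (by name: the statement is the Claim_ definition above) =====
theorem solve_spec : Claim_equal_solve := by
  intro n k a _ hpre
  obtain ⟨hlen, hkpos, _⟩ := hpre
  unfold Spec_solve
  by_cases hn : n ≤ 0
  · by_cases ha : a = []
    · subst ha
      rw [solveA_nonpos n k [] hn, if_pos rfl, solveB_nil n k]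
    · rw [solveA_nonpos n k a hn, if_neg ha,
          solveB_no n k a (Nat.ne_of_lt (slice_to_length_lt n a ha (by
            have : 0 < a.length := List.length_pos_iff.2 ha
            omega)))]
  · have hn0 : 0 < n := by omega
    have hk : 1 ≤ k := hkpos hn0
    have hk' : 0 < k.toNat := by omega
    have hn' : n.toNat ≤ a.length := by omega
    have hkk : k = (k.toNat : Int) := by omega
    have hnn : n = (n.toNat : Int) := by omega
    rw [hnn, hkk, solveA_eq k.toNat n.toNat a hk' hn']
    by_cases hal : a.length = n.toNat
    · -- n is the length of a: the real check
      have ht1 : a.take n.toNat = a := by rw [← hal]; exact List.take_length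
      unfold solve_alt
      dsimp only
      rw [PySem.List.slice_to_natCast, ht1, countsB_eq, countsB_eq,
          pairsE_natCast, pairsE_natCast]
      have h := (sorted_eq_cList_iff k.toNat a hk').trans (counts_eq_iff k.toNat a hk').symm
      have h2 := dictEq_counter_iff (pairsL k.toNat (PySem.List.sorted a (fun x => x) false)) (pairsL k.toNat a)
      by_cases hc : PySem.List.sorted a (fun x => x) false = cList k.toNat a
      · rw [if_pos hc, if_pos (h2.mpr (h.mp hc))]
      · rw [if_neg hc, if_neg (by
          intro hb2
          exact hc (h.mpr (h2.mp hb2)))]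
    · -- n < len(a): both sides are 'No' by a length mismatch
      have hlt : n.toNat < a.length := by omega
      have hA : PySem.List.sorted a (fun x => x) false ≠ cList k.toNat (a.take n.toNat) := by
        intro hEq
        have := congrArg List.length hEq
        rw [PySem.List.length_sorted] at this
        simp [cList, List.length_take, Nat.min_eq_left hn'] at this
        omega
      rw [if_neg hA, solveB_no _ _ a (by
        rw [PySem.List.slice_to_natCast, List.length_take, Nat.min_eq_left hn']
        omega)]
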